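-- pv_equiv track=rewrite | github.com/PacktPublishing/Advanced-Data-Structures-and-Algorithms-in-Python | Section 2/3_binary_search_length.py | length_ok
-- ===== SOURCE A (Python) =====
-- from collections import deque
--
-- def length_ok(array, length, k):
--     maximum = max(array[:length])
--     minimum = min(array[:length])
--     d_max = deque()
--     d_min = deque()
--     d_max.append(0)
--     d_min.append(0)
--     result = maximum - minimum <= k
--     for i in range(len(array)):
--         if i - d_min[0] == length:
--             d_min.popleft()
--         if i - d_max[0] == length:
--             d_max.popleft()
--         while len(d_min) and array[d_min[-1]] >= array[i]:
--             d_min.pop()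
--         while len(d_max) and array[d_max[-1]] <= array[i]:
--             d_max.pop()
--         d_min.append(i)
--         d_max.append(i)
--
--         if i >= length:
--             minimum = array[d_min[0]]
--             maximum = array[d_max[0]]
--             result = result or (maximum - minimum <= k)
--
--     return result
-- ===== SOURCE B (Python) =====
-- def length_ok(array, length, k):
--     result = max(array[:length]) - min(array[:length]) <= k
--     for i in range(length, len(array)):
--         w = array[i - length + 1:i + 1]
--         result = result or max(w) - min(w) <= k
--     return result
-- ===== Notes on version B (the rewrite author's own statement) =====
-- stated objective: simpler
-- what changed: Replaces A's monotonic-deque sliding-window pass with a plain loop that recomputes each window's max/min directly from a slice, seeded by the first-window check.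
-- outside the precondition, e.g. on length_ok([0, 5, 0], -1, 3): A returns True, B raises ValueError
import Mathlib
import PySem

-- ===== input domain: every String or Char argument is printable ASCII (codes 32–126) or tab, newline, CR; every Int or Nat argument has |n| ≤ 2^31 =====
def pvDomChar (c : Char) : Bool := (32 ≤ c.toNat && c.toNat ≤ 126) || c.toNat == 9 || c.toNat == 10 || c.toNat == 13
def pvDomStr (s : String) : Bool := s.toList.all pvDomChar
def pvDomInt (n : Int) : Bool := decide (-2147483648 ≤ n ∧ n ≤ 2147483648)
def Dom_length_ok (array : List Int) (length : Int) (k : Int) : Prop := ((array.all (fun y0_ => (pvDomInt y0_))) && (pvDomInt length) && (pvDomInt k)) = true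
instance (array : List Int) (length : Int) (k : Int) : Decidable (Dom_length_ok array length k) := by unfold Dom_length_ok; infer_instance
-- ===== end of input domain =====

-- B replaces A's monotonic-deque sliding-window pass by direct recomputation of each
-- window's max/min from a slice (simpler; return value only, neither mutates its input).

-- ===== PORT A =====
-- Python deques are stored back-to-front (head = most recently appended element), so
-- `d.pop()` from the right end is structural; `d[0]` is getLastD, `d.popleft()` is dropLast.
def pvVal (array : List Int) (j : Int) : Int := (PySem.List.pyGet? array j).getD 0

def pvPopWhile (p : Int → Bool) : List Int → List Int
  | [] => []
  | j :: rest => if p j then pvPopWhile p rest else j :: rest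

def pvStepA (array : List Int) (length k : Int) (st : List Int × List Int × Bool) (i : Int) :
    List Int × List Int × Bool :=
  let dmax := st.1
  let dmin := st.2.1
  let result := st.2.2
  let dmin := if i - dmin.getLastD 0 = length then dmin.dropLast else dmin
  let dmax := if i - dmax.getLastD 0 = length then dmax.dropLast else dmax
  let dmin := i :: pvPopWhile (fun j => decide (pvVal array j ≥ pvVal array i)) dmin
  let dmax := i :: pvPopWhile (fun j => decide (pvVal array j ≤ pvVal array i)) dmax
  if i ≥ length then
    let minimum := pvVal array (dmin.getLastD 0)
    let maximum := pvVal array (dmax.getLastD 0)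
    (dmax, dmin, result || decide (maximum - minimum ≤ k))
  else
    (dmax, dmin, result)

def length_ok (array : List Int) (length : Int) (k : Int) : Bool :=
  let pre := PySem.List.slice array none (some length)
  let maximum := (PySem.List.max? pre (fun x => x)).getD 0
  let minimum := (PySem.List.min? pre (fun x => x)).getD 0
  let result := decide (maximum - minimum ≤ k)
  ((PySem.List.pyRange 0 (array.length : Int) 1).foldl (pvStepA array length k)
    ([0], [0], result)).2.2

-- ===== PORT B =====
def pvWindowOK (array : List Int) (length k : Int) (i : Int) : Bool :=
  let w := PySem.List.slice array (some (i - length + 1)) (some (i + 1))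
  decide ((PySem.List.max? w (fun x => x)).getD 0 - (PySem.List.min? w (fun x => x)).getD 0 ≤ k)

def length_ok_alt (array : List Int) (length : Int) (k : Int) : Bool :=
  let pre := PySem.List.slice array none (some length)
  (PySem.List.pyRange length (array.length : Int) 1).foldl
    (fun result i => result || pvWindowOK array length k i)
    (decide ((PySem.List.max? pre (fun x => x)).getD 0
      - (PySem.List.min? pre (fun x => x)).getD 0 ≤ k))

-- ===== PRECONDITION & SPEC =====
-- Pre_ excludes empty arrays and non-positive length (there `max(array[:length])` raises
-- ValueError, or — for negative length with a long enough array — A's deque eviction never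
-- fires and A returns an accidental prefix-based value while B's empty window slice makes
-- `max()` raise ValueError).
def Pre_length_ok (array : List Int) (length : Int) (k : Int) : Prop :=
  1 ≤ length ∧ array ≠ []
instance (array : List Int) (length : Int) (k : Int) : Decidable (Pre_length_ok array length k) := by
  unfold Pre_length_ok; infer_instance

def pvWitness_length_ok : List Int × Int × Int := ([0, 5, 0], 2, 5)

def Spec_length_ok (array : List Int) (length : Int) (k : Int) (out : Bool) : Prop := out = length_ok_alt array length k
instance (array : List Int) (length : Int) (k : Int) (out : Bool) : Decidable (Spec_length_ok array length k out) := by unfold Spec_length_ok; infer_instance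

-- ===== CLAIM (what is proved, stated in full; the proofs are below) =====
def Claim_equal_length_ok : Prop := ∀ (array : List Int) (length : Int) (k : Int), Dom_length_ok array length k → Pre_length_ok array length k → Spec_length_ok array length k (length_ok array length k)

-- ===== LEMMAS AND PROOFS =====

-- the deque invariant after processing indices 0 .. m-1, for valuation g
-- (g = pvVal for the min deque, g = -pvVal for the max deque)
def pvDInv (g : Int → Int) (L : Int) (m : Nat) (d : List Int) : Prop :=
  d ≠ [] ∧
  (∀ e ∈ d, (m : Int) - L ≤ e ∧ 0 ≤ e ∧ e < (m : Int)) ∧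
  d.Pairwise (· > ·) ∧
  d.Pairwise (fun a b => g b < g a) ∧
  (∀ j : Int, (m : Int) - L ≤ j → 0 ≤ j → j < (m : Int) → ∃ e ∈ d, j ≤ e ∧ g e ≤ g j)

theorem pvPopWhile_sublist (p : Int → Bool) (l : List Int) : (pvPopWhile p l).Sublist l := by
  induction l with
  | nil => simp [pvPopWhile]
  | cons x t ih =>
    simp only [pvPopWhile]
    split
    · exact ih.trans (List.sublist_cons_self x t)
    · exact List.Sublist.refl _

theorem pvPopWhile_split (p : Int → Bool) (l : List Int) :
    ∃ pre, l = pre ++ pvPopWhile p l ∧ ∀ x ∈ pre, p x = true := by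
  induction l with
  | nil => exact ⟨[], by simp [pvPopWhile]⟩
  | cons x t ih =>
    by_cases h : p x = true
    · obtain ⟨pre, h1, h2⟩ := ih
      refine ⟨x :: pre, ?_, ?_⟩
      · simp [pvPopWhile, h, ← h1]
      · intro y hy
        rcases List.mem_cons.mp hy with rfl | hy
        · exact h
        · exact h2 y hy
    · exact ⟨[], by simp [pvPopWhile, h]⟩

theorem pvPopWhile_head (p : Int → Bool) (l : List Int) :
    pvPopWhile p l = [] ∨ ∃ h t, pvPopWhile p l = h :: t ∧ p h = false := by
  induction l with
  | nil => left; rfl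
  | cons x t ih =>
    by_cases h : p x = true
    · simpa [pvPopWhile, h] using ih
    · right; exact ⟨x, t, by simp [pvPopWhile, h], by simp [h]⟩

-- getLast of a list pairwise-decreasing under f is f-minimal
theorem pvGetLast_min (f : Int → Int) (d : List Int) (hne : d ≠ [])
    (hp : d.Pairwise (fun a b => f b < f a)) : ∀ e ∈ d, f (d.getLast hne) ≤ f e := by
  induction d with
  | nil => simp at hne
  | cons x t ih =>
    intro e he
    rcases List.pairwise_cons.mp hp with ⟨hx, ht⟩
    cases t with
    | nil =>
      rcases List.mem_singleton.mp he with rfl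
      simp
    | cons y u =>
      rw [List.getLast_cons (by simp)]
      rcases List.mem_cons.mp he with rfl | he
      · exact le_of_lt (hx _ (List.getLast_mem _))
      · exact ih (by simp) ht e he

theorem pvDInv_one (g : Int → Int) (L : Int) (hL : 1 ≤ L) : pvDInv g L 1 [0] := by
  refine ⟨by simp, ?_, by simp, by simp, ?_⟩
  · intro e he
    rcases List.mem_singleton.mp he with rfl
    norm_num
    omega
  · intro j h1 h2 h3
    have hj : j = 0 := by norm_num at h3; omega
    subst hj
    exact ⟨0, List.mem_singleton.mpr rfl, le_rfl, le_rfl⟩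

-- getLastD of a nonempty list is its getLast
theorem pvGetLastD (d : List Int) (h : d ≠ []) : d.getLastD 0 = d.getLast h := by
  simp [List.getLastD_eq_getLast?, List.getLast?_eq_some_getLast h]

-- the step lemma: one iteration of A's deque maintenance preserves the invariant
theorem pvDInv_step (g : Int → Int) (L : Int) (m : Nat) (d : List Int)
    (hL : 1 ≤ L) (hinv : pvDInv g L m d) :
    pvDInv g L (m + 1)
      (↑m :: pvPopWhile (fun j => decide (g j ≥ g m))
        (if (m : Int) - d.getLastD 0 = L then d.dropLast else d)) := by
  obtain ⟨hne, hmem, hpidx, hpval, hwit⟩ := hinv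
  rw [pvGetLastD d hne]
  -- index-minimality of the old front
  have hlast_min : ∀ e ∈ d, d.getLast hne ≤ e := by
    intro e he
    have := pvGetLast_min (fun x => x) d hne (by
      refine hpidx.imp ?_
      intro a b hab
      exact hab) e he
    simpa using this
  have hdecomp : d.dropLast ++ [d.getLast hne] = d := List.dropLast_append_getLast hne
  have hdrop_gt : ∀ e ∈ d.dropLast, d.getLast hne < e := by
    intro e he
    have hp : (d.dropLast ++ [d.getLast hne]).Pairwise (· > ·) := by rw [hdecomp]; exact hpidx
    exact (List.pairwise_append.mp hp).2.2 e he _ (List.mem_singleton.mpr rfl)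
  set d1 := if (m : Int) - d.getLast hne = L then d.dropLast else d with hd1
  have hd1_sub : d1.Sublist d := by
    rw [hd1]; split
    · exact List.dropLast_sublist d
    · exact List.Sublist.refl d
  -- after eviction every element is strictly inside the next window
  have hd1_mem : ∀ e ∈ d1, (m : Int) + 1 - L ≤ e ∧ 0 ≤ e ∧ e < (m : Int) := by
    intro e he
    have hed : e ∈ d := hd1_sub.mem he
    obtain ⟨h1, h2, h3⟩ := hmem e hed
    refine ⟨?_, h2, h3⟩
    rw [hd1] at he
    by_cases hev : (m : Int) - d.getLast hne = L
    · rw [if_pos hev] at he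
      have := hdrop_gt e he
      omega
    · rw [if_neg hev] at he
      have hge := hlast_min e hed
      obtain ⟨hg1, _, _⟩ := hmem _ (List.getLast_mem hne)
      omega
  -- the witness survives eviction for the next window
  have hd1_wit : ∀ j : Int, (m : Int) + 1 - L ≤ j → 0 ≤ j → j < (m : Int) →
      ∃ e ∈ d1, j ≤ e ∧ g e ≤ g j := by
    intro j h1 h2 h3
    obtain ⟨e, hed, hje, hge⟩ := hwit j (by omega) h2 h3
    refine ⟨e, ?_, hje, hge⟩
    rw [hd1]
    by_cases hev : (m : Int) - d.getLast hne = L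
    · rw [if_pos hev]
      have hed' : e ∈ d.dropLast ++ [d.getLast hne] := by rw [hdecomp]; exact hed
      rcases List.mem_append.mp hed' with h | h
      · exact h
      · rcases List.mem_singleton.mp h with rfl
        omega
    · rw [if_neg hev]; exact hed
  set d2 := pvPopWhile (fun j => decide (g j ≥ g m)) d1 with hd2
  have hd2_sub : d2.Sublist d1 := pvPopWhile_sublist _ d1
  obtain ⟨pre, hpre, hpre_p⟩ := pvPopWhile_split (fun j => decide (g j ≥ g m)) d1
  have hd2_mem : ∀ e ∈ d2, (m : Int) + 1 - L ≤ e ∧ 0 ≤ e ∧ e < (m : Int) :=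
    fun e he => hd1_mem e (hd2_sub.mem he)
  have hd2_pidx : d2.Pairwise (· > ·) := hpidx.sublist (hd2_sub.trans hd1_sub)
  have hd2_pval : d2.Pairwise (fun a b => g b < g a) := hpval.sublist (hd2_sub.trans hd1_sub)
  -- every surviving element has g-value below g m
  have hd2_lt : ∀ e ∈ d2, g e < g ↑m := by
    intro e he
    rcases pvPopWhile_head (fun j => decide (g j ≥ g m)) d1 with h | ⟨h0, t, hht, hhp⟩
    · rw [← hd2] at h; rw [h] at he; exact absurd he (List.not_mem_nil)
    · rw [← hd2] at hht
      have hh0 : g h0 < g ↑m := by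
        have := of_decide_eq_false hhp
        omega
      rw [hht] at he
      rcases List.mem_cons.mp he with rfl | he
      · exact hh0
      · have hp2 := hd2_pval
        rw [hht] at hp2
        have := (List.pairwise_cons.mp hp2).1 e he
        omega
  refine ⟨by simp, ?_, ?_, ?_, ?_⟩
  · intro e he
    rcases List.mem_cons.mp he with rfl | he
    · push_cast; omega
    · obtain ⟨h1, h2, h3⟩ := hd2_mem e he
      push_cast; omega
  · rw [List.pairwise_cons]
    exact ⟨fun e he => by have := (hd2_mem e he).2.2; omega, hd2_pidx⟩
  · rw [List.pairwise_cons]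
    exact ⟨hd2_lt, hd2_pval⟩
  · intro j h1 h2 h3
    by_cases hjm : j = (m : Int)
    · subst hjm
      exact ⟨(m : Int), List.mem_cons_self, le_rfl, le_rfl⟩
    · obtain ⟨e, hed1, hje, hge⟩ := hd1_wit j (by push_cast at h1 ⊢; omega) h2 (by omega)
      rw [hpre] at hed1
      rcases List.mem_append.mp hed1 with h | h
      · -- the witness was popped: its g-value is at least g m, so m itself is a witness
        have hpm : g ↑m ≤ g e := by
          have := of_decide_eq_true (hpre_p e h)
          omega
        refine ⟨(m : Int), List.mem_cons_self, by omega, by omega⟩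
      · exact ⟨e, List.mem_cons.mpr (Or.inr h), hje, hge⟩

-- the deque front indexes the window minimum of g
theorem pvDInv_front (g : Int → Int) (L : Int) (m : Nat) (d : List Int)
    (hinv : pvDInv g L m d) :
    ((m : Int) - L ≤ d.getLastD 0 ∧ 0 ≤ d.getLastD 0 ∧ d.getLastD 0 < (m : Int)) ∧
    (∀ j : Int, (m : Int) - L ≤ j → 0 ≤ j → j < (m : Int) → g (d.getLastD 0) ≤ g j) := by
  obtain ⟨hne, hmem, hpidx, hpval, hwit⟩ := hinv
  rw [pvGetLastD d hne]
  refine ⟨hmem _ (List.getLast_mem hne), ?_⟩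
  intro j h1 h2 h3
  obtain ⟨e, hed, _, hge⟩ := hwit j h1 h2 h3
  exact le_trans (pvGetLast_min g d hne hpval e hed) hge

-- pvVal at a valid index is the list element
theorem pvVal_eq (array : List Int) (j : Int) (h0 : 0 ≤ j) (h1 : j < (array.length : Int)) :
    pvVal array j = array[j.toNat]'(by omega) := by
  rw [pvVal, PySem.List.pyGet?_of_nonneg array h0, List.getElem?_eq_getElem (by omega)]
  rfl

-- membership in a window slice
theorem pvMem_slice (array : List Int) (s e : Int) (hs : 0 ≤ s) (he0 : 0 ≤ e)
    (he : e ≤ (array.length : Int)) :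
    ∀ x, x ∈ PySem.List.slice array (some s) (some e) ↔
      ∃ j : Int, s ≤ j ∧ j < e ∧ pvVal array j = x := by
  intro x
  rw [PySem.List.slice_toNat array hs he0]
  constructor
  · intro hx
    obtain ⟨t, ht, hxt⟩ := List.mem_iff_getElem.mp hx
    have ht' : t < e.toNat - s.toNat ∧ s.toNat + t < array.length := by
      simp only [List.length_take, List.length_drop, Nat.lt_min] at ht
      omega
    refine ⟨s + (t : Int), by omega, by omega, ?_⟩
    rw [pvVal_eq array _ (by omega) (by omega)]
    rw [List.getElem_take, List.getElem_drop] at hxt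
    rw [← hxt]
    congr 1
    omega
  · rintro ⟨j, hsj, hje, rfl⟩
    rw [pvVal_eq array j (by omega) (by omega)]
    rw [List.mem_iff_getElem]
    refine ⟨j.toNat - s.toNat, ?_, ?_⟩
    · simp only [List.length_take, List.length_drop, Nat.lt_min]
      omega
    · rw [List.getElem_take, List.getElem_drop]
      congr 1
      omega

-- B's window check, computed from the deque fronts
theorem pvWindowOK_eq (array : List Int) (L k : Int) (m : Nat) (dmax dmin : List Int)
    (hL : 1 ≤ L) (hm : (m : Int) < array.length) (hLm : L ≤ (m : Int))
    (hmax : pvDInv (fun j => -pvVal array j) L (m + 1) dmax)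
    (hmin : pvDInv (pvVal array) L (m + 1) dmin) :
    pvWindowOK array L k m =
      decide (pvVal array (dmax.getLastD 0) - pvVal array (dmin.getLastD 0) ≤ k) := by
  have hmem := pvMem_slice array ((m : Int) - L + 1) ((m : Int) + 1) (by omega) (by omega)
    (by omega)
  obtain ⟨⟨ha1, ha2, ha3⟩, hamin⟩ := pvDInv_front _ L (m + 1) dmax hmax
  obtain ⟨⟨hb1, hb2, hb3⟩, hbmin⟩ := pvDInv_front _ L (m + 1) dmin hmin
  push_cast at ha1 ha3 hb1 hb3 hamin hbmin
  have hfa : pvVal array (dmax.getLastD 0) ∈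
      PySem.List.slice array (some ((m : Int) - L + 1)) (some ((m : Int) + 1)) :=
    (hmem _).mpr ⟨dmax.getLastD 0, by omega, by omega, rfl⟩
  have hfb : pvVal array (dmin.getLastD 0) ∈
      PySem.List.slice array (some ((m : Int) - L + 1)) (some ((m : Int) + 1)) :=
    (hmem _).mpr ⟨dmin.getLastD 0, by omega, by omega, rfl⟩
  have hne : PySem.List.slice array (some ((m : Int) - L + 1)) (some ((m : Int) + 1)) ≠ [] := by
    intro h; rw [h] at hfa; exact (List.not_mem_nil) hfa
  have hxne : PySem.List.max? (PySem.List.slice array (some ((m : Int) - L + 1))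
      (some ((m : Int) + 1))) (fun x => x) ≠ none := by
    intro h; exact hne ((PySem.List.max?_eq_none_iff _ _).mp h)
  have hnne : PySem.List.min? (PySem.List.slice array (some ((m : Int) - L + 1))
      (some ((m : Int) + 1))) (fun x => x) ≠ none := by
    intro h; exact hne ((PySem.List.min?_eq_none_iff _ _).mp h)
  obtain ⟨mx, hmx⟩ := Option.ne_none_iff_exists'.mp hxne
  obtain ⟨mn, hmn⟩ := Option.ne_none_iff_exists'.mp hnne
  have hmxv : mx = pvVal array (dmax.getLastD 0) := by
    obtain ⟨j, hj1, hj2, hj3⟩ := (hmem mx).mp (PySem.List.max?_mem hmx)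
    have h1 : mx ≤ pvVal array (dmax.getLastD 0) := by
      rw [← hj3]
      have := hamin j (by omega) (by omega) (by omega)
      omega
    have h2 : pvVal array (dmax.getLastD 0) ≤ mx := PySem.List.max?_isMax hmx _ hfa
    omega
  have hmnv : mn = pvVal array (dmin.getLastD 0) := by
    obtain ⟨j, hj1, hj2, hj3⟩ := (hmem mn).mp (PySem.List.min?_mem hmn)
    have h1 : pvVal array (dmin.getLastD 0) ≤ mn := by
      rw [← hj3]
      exact hbmin j (by omega) (by omega) (by omega)
    have h2 : mn ≤ pvVal array (dmin.getLastD 0) := PySem.List.min?_isMin hmn _ hfb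
    omega
  simp only [pvWindowOK]
  rw [hmx, hmn]
  simp [hmxv, hmnv]

theorem pvFoldl_or {α : Type} (f : α → Bool) (l : List α) (b : Bool) :
    (l.foldl (fun r i => r || f i) b) = (b || l.any f) := by
  induction l generalizing b with
  | nil => simp
  | cons x t ih => rw [List.foldl_cons, ih, List.any_cons, Bool.or_assoc]

-- the main loop invariant for A's fold
theorem pvMain (array : List Int) (L k : Int) (hL : 1 ≤ L) (seed : Bool) :
    ∀ m : Nat, 1 ≤ m → m ≤ array.length →
    ∃ dmax dmin,
      (PySem.List.pyRange 0 (m : Int) 1).foldl (pvStepA array L k) ([0], [0], seed)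
        = (dmax, dmin, seed || (PySem.List.pyRange L (m : Int) 1).any (pvWindowOK array L k)) ∧
      pvDInv (fun j => -pvVal array j) L m dmax ∧
      pvDInv (pvVal array) L m dmin := by
  intro m hm
  induction m, hm using Nat.le_induction with
  | base =>
    intro _
    refine ⟨[0], [0], ?_, pvDInv_one _ L hL, pvDInv_one _ L hL⟩
    have h1 : PySem.List.pyRange 0 ((1 : Nat) : Int) 1 = [0] := by decide
    rw [h1]
    simp only [List.foldl_cons, List.foldl_nil]
    have hnge : ¬((0 : Int) ≥ L) := by omega
    have hstep : pvStepA array L k ([0], [0], seed) 0 = ([0], [0], seed) := by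
      simp only [pvStepA]
      rw [if_neg hnge]
      simp [pvPopWhile, show ¬((0 : Int) = L) by omega]
    rw [hstep, PySem.List.pyRange_one_eq_nil (show ((1 : Nat) : Int) ≤ L by push_cast; omega)]
    simp
  | succ m hm ih =>
    intro hmn
    obtain ⟨dmax, dmin, hfold, hinvmax, hinvmin⟩ := ih (by omega)
    have hm' : (m : Int) < (array.length : Int) := by omega
    have hrange : PySem.List.pyRange 0 (((m + 1 : Nat)) : Int) 1
        = PySem.List.pyRange 0 ((m : Nat) : Int) 1 ++ [((m : Nat) : Int)] := by
      push_cast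
      exact PySem.List.pyRange_one_succ_right (by positivity)
    rw [hrange, List.foldl_append, hfold]
    simp only [List.foldl_cons, List.foldl_nil]
    have hinvmin' := pvDInv_step (pvVal array) L m dmin hL hinvmin
    have hinvmax' : pvDInv (fun j => -pvVal array j) L (m + 1)
        ((m : Int) :: pvPopWhile (fun j => decide (pvVal array j ≤ pvVal array (m : Int)))
          (if (m : Int) - dmax.getLastD 0 = L then dmax.dropLast else dmax)) := by
      have h := pvDInv_step (fun j => -pvVal array j) L m dmax hL hinvmax
      have heq : (fun j => decide ((fun j => -pvVal array j) j ≥ (fun j => -pvVal array j) ((m : Nat) : Int)))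
          = (fun j => decide (pvVal array j ≤ pvVal array ((m : Nat) : Int))) := by
        funext j
        simp [ge_iff_le, neg_le_neg_iff]
      rwa [heq] at h
    refine ⟨_, _, ?_, hinvmax', hinvmin'⟩
    by_cases hLm : L ≤ (m : Int)
    · have hstep : pvStepA array L k
          (dmax, dmin, seed || (PySem.List.pyRange L ((m : Nat) : Int) 1).any (pvWindowOK array L k)) (m : Int) =
          ((m : Int) :: pvPopWhile (fun j => decide (pvVal array j ≤ pvVal array (m : Int)))
            (if (m : Int) - dmax.getLastD 0 = L then dmax.dropLast else dmax),
           (m : Int) :: pvPopWhile (fun j => decide (pvVal array j ≥ pvVal array (m : Int)))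
            (if (m : Int) - dmin.getLastD 0 = L then dmin.dropLast else dmin),
           (seed || (PySem.List.pyRange L ((m : Nat) : Int) 1).any (pvWindowOK array L k)) ||
             decide (pvVal array
                (((m : Int) :: pvPopWhile (fun j => decide (pvVal array j ≤ pvVal array (m : Int)))
                  (if (m : Int) - dmax.getLastD 0 = L then dmax.dropLast else dmax)).getLastD 0)
              - pvVal array
                (((m : Int) :: pvPopWhile (fun j => decide (pvVal array j ≥ pvVal array (m : Int)))
                  (if (m : Int) - dmin.getLastD 0 = L then dmin.dropLast else dmin)).getLastD 0) ≤ k)) := by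
        simp only [pvStepA]
        rw [if_pos (by exact hLm)]
      rw [hstep]
      rw [← pvWindowOK_eq array L k m _ _ hL hm' hLm hinvmax' hinvmin']
      have hr : PySem.List.pyRange L (((m + 1 : Nat)) : Int) 1
          = PySem.List.pyRange L ((m : Nat) : Int) 1 ++ [((m : Nat) : Int)] := by
        push_cast
        exact PySem.List.pyRange_one_succ_right hLm
      rw [hr]
      simp [Bool.or_assoc]
    · have hstep : pvStepA array L k
          (dmax, dmin, seed || (PySem.List.pyRange L ((m : Nat) : Int) 1).any (pvWindowOK array L k)) (m : Int) =
          ((m : Int) :: pvPopWhile (fun j => decide (pvVal array j ≤ pvVal array (m : Int)))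
            (if (m : Int) - dmax.getLastD 0 = L then dmax.dropLast else dmax),
           (m : Int) :: pvPopWhile (fun j => decide (pvVal array j ≥ pvVal array (m : Int)))
            (if (m : Int) - dmin.getLastD 0 = L then dmin.dropLast else dmin),
           seed || (PySem.List.pyRange L ((m : Nat) : Int) 1).any (pvWindowOK array L k)) := by
        simp only [pvStepA]
        rw [if_neg (by omega)]
      rw [hstep]
      rw [PySem.List.pyRange_one_eq_nil (show ((m : Nat) : Int) ≤ L by omega),
        PySem.List.pyRange_one_eq_nil (show (((m + 1 : Nat)) : Int) ≤ L by push_cast; omega)]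

-- ===== VERDICT (by name: the statement is the Claim_ definition above) =====
theorem length_ok_spec : Claim_equal_length_ok := by
  intro array L k hdom hpre
  obtain ⟨hL, hne⟩ := hpre
  have hn : 1 ≤ array.length := List.length_pos_of_ne_nil hne
  obtain ⟨dmax, dmin, hfold, _, _⟩ :=
    pvMain array L k hL
      (decide ((PySem.List.max? (PySem.List.slice array none (some L)) (fun x => x)).getD 0
        - (PySem.List.min? (PySem.List.slice array none (some L)) (fun x => x)).getD 0 ≤ k))
      array.length hn le_rfl
  have hA : length_ok array L k =
      ((PySem.List.pyRange 0 (array.length : Int) 1).foldl (pvStepA array L k)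
        ([0], [0],
          decide ((PySem.List.max? (PySem.List.slice array none (some L)) (fun x => x)).getD 0
            - (PySem.List.min? (PySem.List.slice array none (some L)) (fun x => x)).getD 0 ≤ k))).2.2 := rfl
  have hB : length_ok_alt array L k =
      (PySem.List.pyRange L (array.length : Int) 1).foldl
        (fun result i => result || pvWindowOK array L k i)
        (decide ((PySem.List.max? (PySem.List.slice array none (some L)) (fun x => x)).getD 0
          - (PySem.List.min? (PySem.List.slice array none (some L)) (fun x => x)).getD 0 ≤ k)) := rfl
  unfold Spec_length_ok
  rw [hA, hB, hfold, pvFoldl_or]
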